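-- pv_equiv track=rewrite | github.com/solomc1/python | ics 33/workspace/project_2/generator.py | n_with_pad
-- ===== SOURCE A (Python) =====
-- def n_with_pad(iterable,n,pad=None):
--     i = iter(iterable)
--     for j in range(n):
--         try:
--             x = next(i)
--             yield x
--         except StopIteration:
--             yield pad
-- ===== SOURCE B (Python) =====
-- def n_with_pad(iterable, n, pad=None):
--     # Two staged passes: materialize, slice the real items, then emit the
--     # computed number of pads by arithmetic -- no per-element exhaustion test.
--     items = list(iterable)
--     k = n if n > 0 else 0
--     yield from items[:k]
--     yield from [pad] * (n - len(items))
-- ===== Notes on version B (the rewrite author's own statement) =====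
-- stated objective: alternative
-- what changed: Instead of a range loop probing the iterator with try/except on each step, B materializes the iterable once, slices out the first max(n,0) real items, and then emits n - len(items) pads computed arithmetically; there is no per-element exhaustion bookkeeping. Note: B consumes the whole iterable eagerly where A consumes it lazily; return-value equivalence only.
import Mathlib
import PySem

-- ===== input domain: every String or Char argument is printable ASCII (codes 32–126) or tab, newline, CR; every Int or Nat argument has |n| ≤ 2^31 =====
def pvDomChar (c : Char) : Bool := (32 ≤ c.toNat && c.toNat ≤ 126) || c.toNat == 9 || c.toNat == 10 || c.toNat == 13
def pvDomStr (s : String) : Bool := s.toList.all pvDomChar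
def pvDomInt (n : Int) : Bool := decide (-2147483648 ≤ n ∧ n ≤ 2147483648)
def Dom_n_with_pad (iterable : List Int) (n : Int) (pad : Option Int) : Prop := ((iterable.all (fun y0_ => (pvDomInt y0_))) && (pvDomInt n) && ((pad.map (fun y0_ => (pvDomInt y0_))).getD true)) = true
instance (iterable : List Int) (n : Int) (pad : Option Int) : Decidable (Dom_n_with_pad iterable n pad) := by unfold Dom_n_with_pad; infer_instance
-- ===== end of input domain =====

-- B materializes the iterable, slices the first max(n,0) items and appends an
-- arithmetically computed number of pads, instead of A's range loop probing the
-- iterator with try/except each step; objective: alternative (return value only —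
-- B consumes the iterable eagerly where A is lazy).

-- ===== PORT A =====
-- 'for j in range(n): try x = next(i); yield x except StopIteration: yield pad',
-- iterator state carried as the unconsumed suffix of the list
def nWithPadLoop (xs : List Int) (pad : Option Int) : Nat → List (Option Int)
  | 0 => []
  | k + 1 =>
    match xs with
    | x :: rest => some x :: nWithPadLoop rest pad k
    | [] => pad :: nWithPadLoop [] pad k

def n_with_pad (iterable : List Int) (n : Int) (pad : Option Int) : List (Option Int) :=
  nWithPadLoop iterable pad n.toNat   -- range(n) has n.toNat iterations

-- ===== PORT B =====
-- items[:k] with k = max(n,0), then [pad] * (n - len(items))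
def n_with_pad_alt (iterable : List Int) (n : Int) (pad : Option Int) : List (Option Int) :=
  let k : Int := if n > 0 then n else 0
  (iterable.take k.toNat).map some ++ List.replicate (n - iterable.length).toNat pad

-- ===== PRECONDITION & SPEC =====
def Spec_n_with_pad (iterable : List Int) (n : Int) (pad : Option Int) (out : List (Option Int)) : Prop := out = n_with_pad_alt iterable n pad
instance (iterable : List Int) (n : Int) (pad : Option Int) (out : List (Option Int)) : Decidable (Spec_n_with_pad iterable n pad out) := by unfold Spec_n_with_pad; infer_instance

-- ===== CLAIM =====
def Claim_equal_n_with_pad : Prop := ∀ (iterable : List Int) (n : Int) (pad : Option Int), Dom_n_with_pad iterable n pad → Spec_n_with_pad iterable n pad (n_with_pad iterable n pad)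

-- ===== LEMMAS AND PROOFS =====
theorem nWithPadLoop_eq (pad : Option Int) (k : Nat) :
    ∀ (xs : List Int),
      nWithPadLoop xs pad k = (xs.take k).map some ++ List.replicate (k - xs.length) pad := by
  induction k with
  | zero => intro xs; simp [nWithPadLoop]
  | succ k ih =>
    intro xs
    cases xs with
    | cons x rest => simp [nWithPadLoop, ih rest]
    | nil => simp [nWithPadLoop, ih [], List.replicate_succ]

-- ===== VERDICT =====
theorem n_with_pad_spec : Claim_equal_n_with_pad := by
  intro iterable n pad _
  unfold Spec_n_with_pad n_with_pad n_with_pad_alt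
  rw [nWithPadLoop_eq]
  show (iterable.take n.toNat).map some ++ List.replicate (n.toNat - iterable.length) pad
      = (iterable.take (if n > 0 then n else 0).toNat).map some
        ++ List.replicate (n - (iterable.length : Int)).toNat pad
  have h1 : n.toNat = (if n > 0 then n else 0).toNat := by split <;> omega
  have h2 : n.toNat - iterable.length = (n - (iterable.length : Int)).toNat := by omega
  rw [h2, ← h1]
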